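-- pv_equiv track=rewrite | github.com/MrHamdulay/csc3-capstone | examples/data/Assignment_4/tmpste002/ndom.py | decimal_to_ndom
-- ===== SOURCE A (Python) =====
-- def decimal_to_ndom(a):
--     """Converts a decimal number to Ndom"""
--     ndom = ''
--     exp = 0
--     while 6**exp <= a:
--         exp += 1
--     for i in range(exp, 0, -1):
--         ndom += str(a // (6**(i-1)))
--         a %= 6 ** (i-1)
--     return int(ndom)
-- ===== SOURCE B (Python) =====
-- def decimal_to_ndom(a):
--     """Converts a decimal number to Ndom"""
--     digits = []
--     while a > 0:
--         digits.append(str(a % 6))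
--         a //= 6
--     return int(''.join(reversed(digits)))
-- ===== Notes on version B (the rewrite author's own statement) =====
-- stated objective: alternative
-- what changed: Replaces A's exponent-search loop plus a per-digit loop that recomputes the power 6**(i-1) and takes MSB-first quotients with the standard repeated-division conversion: collect remainders LSB-first, reverse and join.
import Mathlib
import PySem

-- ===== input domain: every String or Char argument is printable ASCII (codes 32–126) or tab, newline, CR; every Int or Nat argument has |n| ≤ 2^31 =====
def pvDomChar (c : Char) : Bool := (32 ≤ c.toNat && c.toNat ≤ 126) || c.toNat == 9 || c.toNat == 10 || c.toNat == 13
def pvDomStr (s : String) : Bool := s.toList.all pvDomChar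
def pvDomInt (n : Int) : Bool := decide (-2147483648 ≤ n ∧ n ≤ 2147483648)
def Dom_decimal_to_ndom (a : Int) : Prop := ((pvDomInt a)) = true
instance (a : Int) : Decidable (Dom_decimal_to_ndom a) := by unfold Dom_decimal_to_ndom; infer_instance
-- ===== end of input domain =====

-- B replaces A's exponent-search plus per-digit power/divide loop by the standard
-- repeated-division base-6 conversion (collect remainders, reverse): an alternative algorithm
-- with the same return value wherever A returns.

-- ===== PORT A =====
-- while 6**exp <= a: exp += 1   (terminates because 6^exp grows past a)
def pvFindExp (a : Int) (exp : Nat) : Nat :=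
  if (6:Int)^exp ≤ a then pvFindExp a (exp+1) else exp
termination_by (a + 1 - (6:Int)^exp).toNat
decreasing_by
  have h2 : (6:Int)^(exp+1) = 6 * 6^exp := by ring
  have h3 : (1:Int) ≤ 6^exp := one_le_pow₀ (by norm_num)
  omega

def decimal_to_ndom (a : Int) : Int :=
  let exp := pvFindExp a 0
  -- for i in range(exp, 0, -1): ndom += str(a // 6**(i-1)); a %= 6**(i-1)
  -- (i ≥ 1 on this range, so (i-1).toNat is exactly i-1)
  let st := (PySem.List.pyRange (exp : Int) 0 (-1)).foldl
    (fun (st : String × Int) i =>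
      (st.1 ++ PySem.Int.toStr (PySem.Int.floordiv st.2 ((6:Int)^(i-1).toNat)),
       PySem.Int.mod st.2 ((6:Int)^(i-1).toNat)))
    ("", a)
  -- int(ndom): int('') raises ValueError (exactly when a ≤ 0); Pre_ excludes that, the getD default is unreached
  (PySem.Int.ofStr? st.1).getD 0

-- ===== PORT B =====
-- while a > 0: digits.append(str(a % 6)); a //= 6
def pvDigitsLoop (a : Int) (digits : List String) : List String :=
  if a > 0 then
    pvDigitsLoop (PySem.Int.floordiv a 6) (digits ++ [PySem.Int.toStr (PySem.Int.mod a 6)])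
  else digits
termination_by a.toNat
decreasing_by
  rw [PySem.Int.floordiv_eq_ediv_of_pos (by norm_num)]
  omega

def decimal_to_ndom_alt (a : Int) : Int :=
  let digits := pvDigitsLoop a []
  -- int(''.join(reversed(digits))): int('') raises ValueError when a ≤ 0 (excluded by Pre_)
  (PySem.Int.ofStr? (PySem.Str.join "" digits.reverse)).getD 0

-- ===== PRECONDITION & SPEC =====
-- Pre_ excludes exactly a ≤ 0, where both A and B raise ValueError on int('').
def Pre_decimal_to_ndom (a : Int) : Prop := 1 ≤ a
instance (a : Int) : Decidable (Pre_decimal_to_ndom a) := by unfold Pre_decimal_to_ndom; infer_instance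
def pvWitness_decimal_to_ndom : Int := 42

def Spec_decimal_to_ndom (a : Int) (out : Int) : Prop := out = decimal_to_ndom_alt a
instance (a : Int) (out : Int) : Decidable (Spec_decimal_to_ndom a out) := by unfold Spec_decimal_to_ndom; infer_instance

-- ===== CLAIM (what is proved, stated in full; the proofs are below) =====
def Claim_equal_decimal_to_ndom : Prop := ∀ (a : Int), Dom_decimal_to_ndom a → Pre_decimal_to_ndom a → Spec_decimal_to_ndom a (decimal_to_ndom a)

-- ===== LEMMAS AND PROOFS =====

-- the base-6 digit string A's for-loop produces, MSB-first, e digits (leading zeros possible)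
def pvPad : Nat → Int → List Char
  | 0, _ => []
  | e+1, a => PySem.Int.toChars (PySem.Int.floordiv a ((6:Int)^e)) ++ pvPad e (PySem.Int.mod a ((6:Int)^e))

-- the digit string of a with no leading zeros, MSB-first (B's reversed remainder list, joined)
def pvG (a : Int) : List Char :=
  if 0 < a then
    pvG (PySem.Int.floordiv a 6) ++ PySem.Int.toChars (PySem.Int.mod a 6)
  else []
termination_by a.toNat
decreasing_by
  rw [PySem.Int.floordiv_eq_ediv_of_pos (by norm_num)]
  omega

theorem pvG_nonpos {a : Int} (h : ¬ 0 < a) : pvG a = [] := by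
  rw [pvG]; simp [h]

theorem pvG_pos {a : Int} (h : 0 < a) :
    pvG a = pvG (PySem.Int.floordiv a 6) ++ PySem.Int.toChars (PySem.Int.mod a 6) := by
  rw [pvG]; simp [h]

theorem pvFindExp_spec (a : Int) (exp : Nat) (h : (6:Int)^exp ≤ a) :
    1 ≤ pvFindExp a exp ∧ (6:Int)^(pvFindExp a exp - 1) ≤ a ∧ a < 6^(pvFindExp a exp) := by
  fun_induction pvFindExp a exp with
  | case1 exp hle ih =>
    by_cases h6 : (6:Int)^(exp+1) ≤ a
    · exact ih h6
    · rw [pvFindExp]; rw [if_neg h6]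
      refine ⟨by omega, ?_, by omega⟩
      simpa using hle
  | case2 exp hle => exact absurd h hle

theorem pvFoldA (e : Nat) : ∀ (a : Int) (acc : String), 0 ≤ a →
    (((PySem.List.pyRange (e : Int) 0 (-1)).foldl
      (fun (st : String × Int) i =>
        (st.1 ++ PySem.Int.toStr (PySem.Int.floordiv st.2 ((6:Int)^(i-1).toNat)),
         PySem.Int.mod st.2 ((6:Int)^(i-1).toNat)))
      (acc, a)).1).toList = acc.toList ++ pvPad e a := by
  induction e with
  | zero =>
    intro a acc _
    rw [PySem.List.pyRange_neg_one_eq_nil (by norm_num)]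
    simp [pvPad]
  | succ e ih =>
    intro a acc ha
    rw [PySem.List.pyRange_neg_one_cons (by exact_mod_cast Nat.succ_pos e)]
    have hc : ((e+1 : Nat) : Int) - 1 = (e : Int) := by push_cast; ring
    simp only [List.foldl_cons, hc, Int.toNat_natCast]
    have hpos : (0:Int) < 6^e := pow_pos (by norm_num) e
    rw [ih _ _ (PySem.Int.mod_nonneg _ hpos)]
    simp [pvPad, String.toList_append, PySem.Int.toList_toStr]

-- shifting one digit out of the padded representation
theorem pvPad_shift (e : Nat) : ∀ a : Int, 0 ≤ a → a < 6^(e+1) →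
    pvPad (e+1) a = pvPad e (PySem.Int.floordiv a 6) ++ PySem.Int.toChars (PySem.Int.mod a 6) := by
  induction e with
  | zero =>
    intro a ha hlt
    have hlt6 : a < 6 := by simpa using hlt
    simp [pvPad]
    congr 1
    omega
  | succ e ih =>
    intro a ha hlt
    have hp : (0:Int) < 6^(e+1) := pow_pos (by norm_num) _
    have hq : (0:Int) < 6^e := pow_pos (by norm_num) _
    -- work with ediv/emod throughout
    have hm : PySem.Int.mod a (6^(e+1)) = a % 6^(e+1) := PySem.Int.mod_eq_emod_of_pos hp
    have hmn : 0 ≤ a % 6^(e+1) := Int.emod_nonneg a (by positivity)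
    have hml : a % 6^(e+1) < 6^(e+1) := Int.emod_lt_of_pos a hp
    have step : pvPad (e+1) (a % 6^(e+1)) =
        pvPad e (PySem.Int.floordiv (a % 6^(e+1)) 6) ++ PySem.Int.toChars (PySem.Int.mod (a % 6^(e+1)) 6) :=
      ih _ hmn hml
    -- arithmetic identities
    have hi : PySem.Int.floordiv a (6^(e+1)) = PySem.Int.floordiv (PySem.Int.floordiv a 6) (6^e) := by
      rw [PySem.Int.floordiv_eq_ediv_of_pos hp, PySem.Int.floordiv_eq_ediv_of_pos (by norm_num : (0:Int) < 6),
          PySem.Int.floordiv_eq_ediv_of_pos hq]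
      rw [Int.ediv_ediv_of_nonneg (by norm_num : (0:Int) ≤ 6)]
      rw [show (6:Int) * 6^e = 6^(e+1) by ring]
    have hiii : PySem.Int.mod (a % 6^(e+1)) 6 = PySem.Int.mod a 6 := by
      rw [PySem.Int.mod_eq_emod_of_pos (by norm_num), PySem.Int.mod_eq_emod_of_pos (by norm_num)]
      exact Int.emod_emod_of_dvd a (dvd_pow_self 6 (Nat.succ_ne_zero e))
    have hii : PySem.Int.floordiv (a % 6^(e+1)) 6 = PySem.Int.mod (PySem.Int.floordiv a 6) (6^e) := by
      rw [PySem.Int.floordiv_eq_ediv_of_pos (by norm_num : (0:Int) < 6),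
          PySem.Int.floordiv_eq_ediv_of_pos (by norm_num : (0:Int) < 6),
          PySem.Int.mod_eq_emod_of_pos hq]
      have e1 : a % 6^(e+1) = a + (-(6^e * (a / 6^(e+1)))) * 6 := by
        rw [Int.emod_def]; ring_nf
      rw [e1, Int.add_mul_ediv_right _ _ (by norm_num : (6:Int) ≠ 0)]
      have e2 : a / 6^(e+1) = a / 6 / 6^e := by
        rw [Int.ediv_ediv_of_nonneg (by norm_num : (0:Int) ≤ 6)]
        rw [show (6:Int) * 6^e = 6^(e+1) by ring]
      rw [Int.emod_def, e2]; ring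
    calc pvPad (e+2) a
        = PySem.Int.toChars (PySem.Int.floordiv a (6^(e+1))) ++ pvPad (e+1) (PySem.Int.mod a (6^(e+1))) := rfl
      _ = PySem.Int.toChars (PySem.Int.floordiv (PySem.Int.floordiv a 6) (6^e)) ++
            (pvPad e (PySem.Int.mod (PySem.Int.floordiv a 6) (6^e)) ++ PySem.Int.toChars (PySem.Int.mod a 6)) := by
          rw [hi, hm, step, hii, hiii]
      _ = pvPad (e+1) (PySem.Int.floordiv a 6) ++ PySem.Int.toChars (PySem.Int.mod a 6) := by
          simp [pvPad]

-- on [6^e, 6^(e+1)) the padded string has no leading zero and equals the digit string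
theorem pvPad_eq_pvG (e : Nat) : ∀ a : Int, 0 < a → (6:Int)^e ≤ a → a < 6^(e+1) →
    pvPad (e+1) a = pvG a := by
  induction e with
  | zero =>
    intro a h0 h1 h2
    simp at h1 h2
    have hd : PySem.Int.floordiv a 6 = 0 := by
      rw [PySem.Int.floordiv_eq_ediv_of_pos (by norm_num)]; omega
    have hm : PySem.Int.mod a 6 = a := by
      rw [PySem.Int.mod_eq_emod_of_pos (by norm_num)]; omega
    rw [pvG_pos h0, hd, pvG_nonpos (by norm_num), hm]
    simp [pvPad]
  | succ e ih =>
    intro a h0 h1 h2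
    have h6 : (6:Int)^(e+1) = 6^e * 6 := by ring
    have h66 : (6:Int)^(e+2) = 6^(e+1) * 6 := by ring
    have hd0 : 0 < PySem.Int.floordiv a 6 := by
      rw [PySem.Int.floordiv_eq_ediv_of_pos (by norm_num)]
      have := (Int.le_ediv_iff_mul_le (by norm_num : (0:Int) < 6)).2 (by nlinarith [pow_pos (by norm_num : (0:Int) < 6) e] : (1:Int) * 6 ≤ a)
      omega
    have hdl : (6:Int)^e ≤ PySem.Int.floordiv a 6 := by
      rw [PySem.Int.floordiv_eq_ediv_of_pos (by norm_num)]
      exact (Int.le_ediv_iff_mul_le (by norm_num)).2 (by rw [← h6]; exact h1)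
    have hdu : PySem.Int.floordiv a 6 < 6^(e+1) := by
      rw [PySem.Int.floordiv_eq_ediv_of_pos (by norm_num)]
      exact (Int.ediv_lt_iff_lt_mul (by norm_num)).2 (by rw [← h66]; exact h2)
    rw [pvPad_shift (e+1) a (by omega) h2, ih _ hd0 hdl hdu, ← pvG_pos h0]

-- Chars.join with empty separator is concatenation
theorem pvJoin_nil_flatten : ∀ l : List (List Char), PySem.Chars.join [] l = l.flatten := by
  intro l
  induction l with
  | nil => simp [PySem.Chars.join_nil]
  | cons p rest ih =>
    cases rest with
    | nil => simp [PySem.Chars.join_singleton]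
    | cons q rest' => rw [PySem.Chars.join_cons_cons]; simp_all

-- B's loop appends to the accumulator
theorem pvDigitsLoop_acc : ∀ (n : Nat) (a : Int), a.toNat ≤ n → ∀ acc,
    pvDigitsLoop a acc = acc ++ pvDigitsLoop a [] := by
  intro n
  induction n with
  | zero =>
    intro a ha acc
    have h : ¬ a > 0 := by omega
    rw [pvDigitsLoop, if_neg h, pvDigitsLoop, if_neg h]
    simp
  | succ n ih =>
    intro a ha acc
    by_cases h : a > 0
    · have hdiv : (PySem.Int.floordiv a 6).toNat ≤ n := by
        rw [PySem.Int.floordiv_eq_ediv_of_pos (by norm_num)]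
        omega
      calc pvDigitsLoop a acc
          = pvDigitsLoop (PySem.Int.floordiv a 6) (acc ++ [PySem.Int.toStr (PySem.Int.mod a 6)]) := by
            rw [pvDigitsLoop, if_pos h]
        _ = (acc ++ [PySem.Int.toStr (PySem.Int.mod a 6)]) ++ pvDigitsLoop (PySem.Int.floordiv a 6) [] := ih _ hdiv _
        _ = acc ++ ([PySem.Int.toStr (PySem.Int.mod a 6)] ++ pvDigitsLoop (PySem.Int.floordiv a 6) []) := by simp
        _ = acc ++ pvDigitsLoop (PySem.Int.floordiv a 6) [PySem.Int.toStr (PySem.Int.mod a 6)] := by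
            rw [ih _ hdiv [PySem.Int.toStr (PySem.Int.mod a 6)]]
        _ = acc ++ pvDigitsLoop a [] := by
            conv_rhs => rw [pvDigitsLoop, if_pos h]
            simp
    · rw [pvDigitsLoop, if_neg h, pvDigitsLoop, if_neg h]
      simp

-- joined reversed digit list = pvG
theorem pvJoin_digits_aux : ∀ (n : Nat) (a : Int), a.toNat ≤ n →
    (PySem.Str.join "" (pvDigitsLoop a []).reverse).toList = pvG a := by
  intro n
  induction n with
  | zero =>
    intro a ha
    have h : ¬ a > 0 := by omega
    rw [pvDigitsLoop, if_neg h, pvG_nonpos h]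
    simp [PySem.Str.toList_join, PySem.Chars.join_nil]
  | succ n ih =>
    intro a ha
    by_cases h : a > 0
    · have hdiv : (PySem.Int.floordiv a 6).toNat ≤ n := by
        rw [PySem.Int.floordiv_eq_ediv_of_pos (by norm_num)]
        omega
      rw [pvDigitsLoop, if_pos h, List.nil_append,
          pvDigitsLoop_acc n _ hdiv [PySem.Int.toStr (PySem.Int.mod a 6)], pvG_pos h, ← ih _ hdiv]
      simp [PySem.Str.toList_join, pvJoin_nil_flatten, PySem.Int.toList_toStr]
    · rw [pvDigitsLoop, if_neg h, pvG_nonpos h]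
      simp [PySem.Str.toList_join, PySem.Chars.join_nil]

theorem pvJoin_digits (a : Int) :
    (PySem.Str.join "" (pvDigitsLoop a []).reverse).toList = pvG a :=
  pvJoin_digits_aux a.toNat a le_rfl

-- ===== VERDICT (by name: the statement is the Claim_ definition above) =====
theorem decimal_to_ndom_spec : Claim_equal_decimal_to_ndom := by
  intro a _ hpre
  unfold Pre_decimal_to_ndom at hpre
  unfold Spec_decimal_to_ndom
  simp only [decimal_to_ndom, decimal_to_ndom_alt]
  have h1 : (6:Int)^0 ≤ a := by simpa using hpre
  obtain ⟨he1, hlo, hhi⟩ := pvFindExp_spec a 0 h1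
  obtain ⟨e', hE⟩ : ∃ e', pvFindExp a 0 = e' + 1 := ⟨pvFindExp a 0 - 1, by omega⟩
  rw [hE] at hlo hhi
  simp only [Nat.add_sub_cancel] at hlo
  rw [hE]
  have hstr : (((PySem.List.pyRange ((e'+1 : Nat) : Int) 0 (-1)).foldl
      (fun (st : String × Int) i =>
        (st.1 ++ PySem.Int.toStr (PySem.Int.floordiv st.2 ((6:Int)^(i-1).toNat)),
         PySem.Int.mod st.2 ((6:Int)^(i-1).toNat)))
      ("", a)).1).toList = pvG a := by
    rw [pvFoldA (e'+1) a "" (by omega)]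
    have h2 : pvPad (e'+1) a = pvG a := pvPad_eq_pvG e' a (by omega) hlo hhi
    simpa using h2
  have hs := String.toList_inj.mp (hstr.trans (pvJoin_digits a).symm)
  rw [hs]
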